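-- pv_equiv track=rewrite | github.com/blarich22/personal-website | misc-proj/Optimal-Matchup/gen_opt_combo_5_25.py | nonuniqueOccurences
-- ===== SOURCE A (Python) =====
-- def nonuniqueOccurences(strArr, arr):
--     for x in range(len(strArr)):
--         count = 0
--         for y in range(len(arr)):
--             if arr[y].find(strArr[x]) != -1:
--                 count+=1
--         if (count > 1):
--             return True
--     return False
-- ===== SOURCE B (Python) =====
-- def nonuniqueOccurences(strArr, arr):
--     # text-major scan: walk the texts once, remembering which (distinct)
--     # patterns have already been seen in an earlier text; a repeat is a hit.
--     pats = list(dict.fromkeys(strArr))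
--     seen = set()
--     for t in arr:
--         for p in pats:
--             if p in t:
--                 if p in seen:
--                     return True
--                 seen.add(p)
--     return False
-- ===== Notes on version B (the rewrite author's own statement) =====
-- stated objective: alternative
-- what changed: A scans pattern-major, counting for each pattern how many texts contain it; B dedupes the patterns and scans text-major with a 'seen' set, returning True as soon as some pattern is found in a second text.
import Mathlib
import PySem

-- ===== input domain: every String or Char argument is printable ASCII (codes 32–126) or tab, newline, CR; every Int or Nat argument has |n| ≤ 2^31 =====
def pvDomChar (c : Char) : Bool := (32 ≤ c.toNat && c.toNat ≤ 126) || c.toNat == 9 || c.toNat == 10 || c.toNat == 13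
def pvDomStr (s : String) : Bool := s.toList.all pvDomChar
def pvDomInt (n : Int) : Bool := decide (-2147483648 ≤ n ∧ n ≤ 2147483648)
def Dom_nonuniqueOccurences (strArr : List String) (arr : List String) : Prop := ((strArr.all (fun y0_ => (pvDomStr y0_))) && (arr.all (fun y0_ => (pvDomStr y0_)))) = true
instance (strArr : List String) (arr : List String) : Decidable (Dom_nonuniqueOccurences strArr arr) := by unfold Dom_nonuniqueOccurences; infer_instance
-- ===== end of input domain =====

-- B replaces A's pattern-major counting with a deduped text-major scan over a 'seen' set (alternative decomposition, early exit on the second containing text).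


-- ===== PORT A =====
-- for x in range(len(strArr)): count texts containing strArr[x]; return True if count > 1
def nonuniqueOccurences (strArr : List String) (arr : List String) : Bool :=
  match strArr with
  | [] => false
  | p :: rest =>
    let count : Int := arr.foldl (fun c t => if PySem.Str.find t p ≠ -1 then c + 1 else c) 0
    if count > 1 then true else nonuniqueOccurences rest arr

-- ===== PORT B =====
-- inner loop: for p in pats: if p in t: if p in seen: return True (none) else seen.add(p)
def pvInnerB (t : String) (seen : PySem.Set String) : List String → Option (PySem.Set String)
  | [] => some seen
  | p :: ps =>
    if PySem.Str.isIn p t then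
      if PySem.Set.contains seen p then none
      else pvInnerB t (PySem.Set.add seen p) ps
    else pvInnerB t seen ps

-- outer loop: for t in arr
def pvOuterB (pats : List String) (seen : PySem.Set String) : List String → Bool
  | [] => false
  | t :: ts =>
    match pvInnerB t seen pats with
    | none => true
    | some seen' => pvOuterB pats seen' ts

def nonuniqueOccurences_alt (strArr : List String) (arr : List String) : Bool :=
  pvOuterB (PySem.List.dedup strArr) PySem.Set.empty arr

-- ===== PRECONDITION & SPEC =====
def Spec_nonuniqueOccurences (strArr : List String) (arr : List String) (out : Bool) : Prop := out = nonuniqueOccurences_alt strArr arr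
instance (strArr : List String) (arr : List String) (out : Bool) : Decidable (Spec_nonuniqueOccurences strArr arr out) := by unfold Spec_nonuniqueOccurences; infer_instance

-- ===== CLAIM (what is proved, stated in full; the proofs are below) =====
def Claim_equal_nonuniqueOccurences : Prop := ∀ (strArr : List String) (arr : List String), Dom_nonuniqueOccurences strArr arr → Spec_nonuniqueOccurences strArr arr (nonuniqueOccurences strArr arr)

-- ===== LEMMAS AND PROOFS =====

-- number of texts in ts containing p
def pvHits (p : String) (ts : List String) : Nat :=
  ts.countP (fun t => PySem.Str.isIn p t)

theorem pvHits_cons (p t : String) (ts : List String) :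
    pvHits p (t :: ts) = (if PySem.Str.isIn p t then 1 else 0) + pvHits p ts := by
  simp only [pvHits, List.countP_cons]
  split_ifs <;> omega

theorem contains_iff_mem (seen : PySem.Set String) (p : String) :
    PySem.Set.contains seen p = true ↔ p ∈ seen :=
  PySem.Set.contains_iff seen p

-- A-side: the inner count is pvHits
theorem countA_eq (p : String) (arr : List String) :
    arr.foldl (fun c t => if PySem.Str.find t p ≠ -1 then c + 1 else c) 0 = (pvHits p arr : Int) := by
  have key : ∀ (l : List String) (a : Int),
      l.foldl (fun c t => if PySem.Str.find t p ≠ -1 then c + 1 else c) a = a + (pvHits p l : Int) := by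
    intro l
    induction l with
    | nil => intro a; simp [pvHits]
    | cons t ts ih =>
      intro a
      have hIff : (PySem.Str.find t p ≠ -1) ↔ PySem.Str.isIn p t = true := by
        constructor
        · intro h
          rw [PySem.Str.isIn_iff_infix]
          exact (PySem.Str.find_ne_neg_one_iff t p).mp h
        · intro h
          exact (PySem.Str.find_ne_neg_one_iff t p).mpr ((PySem.Str.isIn_iff_infix p t).mp h)
      simp only [List.foldl_cons, ih, pvHits_cons]
      by_cases h : PySem.Str.isIn p t = true
      · rw [if_pos (hIff.mpr h), if_pos h]; push_cast; ring
      · rw [if_neg (fun hc => h (hIff.mp hc)), if_neg h]; simp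
  rw [key arr 0]; simp

theorem portA_true_iff (strArr arr : List String) :
    nonuniqueOccurences strArr arr = true ↔ ∃ p ∈ strArr, 2 ≤ pvHits p arr := by
  induction strArr with
  | nil => simp [nonuniqueOccurences]
  | cons p rest ih =>
    simp only [nonuniqueOccurences, countA_eq]
    by_cases h : (pvHits p arr : Int) > 1
    · have h2 : 2 ≤ pvHits p arr := by exact_mod_cast h
      rw [if_pos h]
      simp only [true_iff]
      exact ⟨p, List.mem_cons_self .., h2⟩
    · have h2 : ¬ 2 ≤ pvHits p arr := by
        intro hc; exact h (by exact_mod_cast hc)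
      rw [if_neg h, ih]
      constructor
      · rintro ⟨q, hq, hh⟩; exact ⟨q, List.mem_cons_of_mem _ hq, hh⟩
      · rintro ⟨q, hq, hh⟩
        rcases List.mem_cons.mp hq with rfl | hq
        · exact absurd hh h2
        · exact ⟨q, hq, hh⟩

-- B-side inner-loop characterisation, for a Nodup pattern list
theorem innerB_spec (t : String) (ps : List String) (hnd : ps.Nodup) (seen : PySem.Set String) :
    (pvInnerB t seen ps = none ↔ ∃ p ∈ ps, PySem.Str.isIn p t = true ∧ p ∈ seen) ∧
    (∀ seen', pvInnerB t seen ps = some seen' →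
      ∀ q, q ∈ seen' ↔ q ∈ seen ∨ (q ∈ ps ∧ PySem.Str.isIn q t = true)) := by
  induction ps generalizing seen with
  | nil => simp [pvInnerB]
  | cons p ps ih =>
    have hnd' : ps.Nodup := hnd.of_cons
    have hpnot : p ∉ ps := (List.nodup_cons.mp hnd).1
    have hmemAdd : ∀ (s : PySem.Set String) (x y : String),
        y ∈ PySem.Set.add s x ↔ y ∈ s ∨ y = x := by
      intro s x y; exact PySem.Set.mem_add s x y
    constructor
    · -- none characterisation
      simp only [pvInnerB]
      by_cases hin : PySem.Str.isIn p t = true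
      · rw [if_pos hin]
        by_cases hc : p ∈ seen
        · rw [if_pos ((contains_iff_mem seen p).mpr hc)]
          simp only [true_iff]
          exact ⟨p, List.mem_cons_self .., hin, hc⟩
        · rw [if_neg (fun hcb => hc ((contains_iff_mem seen p).mp hcb)), (ih hnd' _).1]
          constructor
          · rintro ⟨q, hq, hqin, hqc⟩
            refine ⟨q, List.mem_cons_of_mem _ hq, hqin, ?_⟩
            rcases (hmemAdd seen p q).mp hqc with h | rfl
            · exact h
            · exact absurd hq hpnot
          · rintro ⟨q, hq, hqin, hqc⟩
            rcases List.mem_cons.mp hq with rfl | hq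
            · exact absurd hqc hc
            · exact ⟨q, hq, hqin, (hmemAdd seen p q).mpr (Or.inl hqc)⟩
      · rw [if_neg hin, (ih hnd' _).1]
        constructor
        · rintro ⟨q, hq, hqin, hqc⟩; exact ⟨q, List.mem_cons_of_mem _ hq, hqin, hqc⟩
        · rintro ⟨q, hq, hqin, hqc⟩
          rcases List.mem_cons.mp hq with rfl | hq
          · exact absurd hqin hin
          · exact ⟨q, hq, hqin, hqc⟩
    · -- some characterisation
      intro seen' hsome q
      simp only [pvInnerB] at hsome
      by_cases hin : PySem.Str.isIn p t = true
      · rw [if_pos hin] at hsome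
        by_cases hc : p ∈ seen
        · rw [if_pos ((contains_iff_mem seen p).mpr hc)] at hsome
          exact absurd hsome (by simp)
        · rw [if_neg (fun hcb => hc ((contains_iff_mem seen p).mp hcb))] at hsome
          rw [(ih hnd' _).2 seen' hsome q, hmemAdd]
          constructor
          · rintro ((h | rfl) | ⟨hm, ht⟩)
            · exact Or.inl h
            · exact Or.inr ⟨List.mem_cons_self .., hin⟩
            · exact Or.inr ⟨List.mem_cons_of_mem _ hm, ht⟩
          · rintro (h | ⟨hm, ht⟩)
            · exact Or.inl (Or.inl h)
            · rcases List.mem_cons.mp hm with rfl | hm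
              · exact Or.inl (Or.inr rfl)
              · exact Or.inr ⟨hm, ht⟩
      · rw [if_neg hin] at hsome
        rw [(ih hnd' _).2 seen' hsome q]
        constructor
        · rintro (h | ⟨hm, ht⟩)
          · exact Or.inl h
          · exact Or.inr ⟨List.mem_cons_of_mem _ hm, ht⟩
        · rintro (h | ⟨hm, ht⟩)
          · exact Or.inl h
          · rcases List.mem_cons.mp hm with rfl | hm
            · exact absurd ht hin
            · exact Or.inr ⟨hm, ht⟩

-- threshold: how many more hits q needs, given what seen already records
def pvThr (seen : PySem.Set String) (q : String) : Nat :=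
  if q ∈ seen then 1 else 2

theorem outerB_true_iff (pats : List String) (hnd : pats.Nodup) (ts : List String) :
    ∀ seen, (pvOuterB pats seen ts = true ↔ ∃ p ∈ pats, pvThr seen p ≤ pvHits p ts) := by
  induction ts with
  | nil =>
    intro seen
    simp only [pvOuterB, pvHits, List.countP_nil]
    constructor
    · intro h; exact absurd h (by simp)
    · rintro ⟨p, _, hh⟩
      unfold pvThr at hh
      split_ifs at hh <;> omega
  | cons t ts ih =>
    intro seen
    simp only [pvOuterB]
    rcases hsi : pvInnerB t seen pats with _ | seen'
    · -- returned none: some pattern is in t and was already seen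
      obtain ⟨q, hq, hqin, hqc⟩ := ((innerB_spec t pats hnd seen).1).mp hsi
      simp only [true_iff]
      refine ⟨q, hq, ?_⟩
      rw [pvHits_cons, if_pos hqin]
      have : pvThr seen q = 1 := if_pos hqc
      omega
    · have hnone : ¬ ∃ p ∈ pats, PySem.Str.isIn p t = true ∧ p ∈ seen := by
        rw [← (innerB_spec t pats hnd seen).1, hsi]; simp
      have hcont := (innerB_spec t pats hnd seen).2 seen' hsi
      rw [ih seen']
      have hthr : ∀ q ∈ pats, pvThr seen' q + (if PySem.Str.isIn q t then 1 else 0) = pvThr seen q := by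
        intro q hq
        by_cases hqt : PySem.Str.isIn q t = true
        · have hcs : q ∉ seen := fun hcc => hnone ⟨q, hq, hqt, hcc⟩
          have hq' : q ∈ seen' := (hcont q).mpr (Or.inr ⟨hq, hqt⟩)
          rw [if_pos hqt]
          unfold pvThr
          rw [if_pos hq', if_neg hcs]
        · have : (q ∈ seen') ↔ (q ∈ seen) := by
            rw [hcont q]
            constructor
            · rintro (h | ⟨_, ht⟩); exact h; exact absurd ht hqt
            · exact Or.inl
          rw [if_neg hqt]
          unfold pvThr
          simp [this]
      constructor
      · rintro ⟨q, hq, hh⟩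
        refine ⟨q, hq, ?_⟩
        rw [pvHits_cons]
        have := hthr q hq
        omega
      · rintro ⟨q, hq, hh⟩
        refine ⟨q, hq, ?_⟩
        rw [pvHits_cons] at hh
        have := hthr q hq
        omega

theorem portB_true_iff (strArr arr : List String) :
    nonuniqueOccurences_alt strArr arr = true ↔ ∃ p ∈ strArr, 2 ≤ pvHits p arr := by
  unfold nonuniqueOccurences_alt
  rw [outerB_true_iff _ (PySem.List.nodup_dedup strArr) arr PySem.Set.empty]
  have hempty : ∀ q : String, pvThr PySem.Set.empty q = 2 := by
    intro q; unfold pvThr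
    rw [if_neg (by simp [PySem.Set.empty])]
  constructor
  · rintro ⟨q, hq, hh⟩
    exact ⟨q, (PySem.List.mem_dedup strArr q).mp hq, by rwa [hempty q] at hh⟩
  · rintro ⟨q, hq, hh⟩
    exact ⟨q, (PySem.List.mem_dedup strArr q).mpr hq, by rwa [hempty q]⟩

-- ===== VERDICT (by name: the statement is the Claim_ definition above) =====
theorem nonuniqueOccurences_spec : Claim_equal_nonuniqueOccurences := by
  intro strArr arr _
  unfold Spec_nonuniqueOccurences
  rw [Bool.eq_iff_iff, portA_true_iff, portB_true_iff]
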